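-- pv_equiv track=rewrite | github.com/catclever/jupyter_analysis_visualize | backend/notebook_manager.py | _format_source
-- ===== SOURCE A (Python) =====
-- from typing import Any, Dict, List, Optional, Literal
--
-- def _format_source(content: str) -> List[str]:
--     """Convert content string to Jupyter source format (list of lines)"""
--     lines = content.split('\n')
--     # Add newline character to each line except the last (unless it's empty)
--     result = []
--     for i, line in enumerate(lines):
--         if i < len(lines) - 1:
--             result.append(line + '\n')
--         elif line:  # Only add last line if not empty
--             result.append(line)
--     return result
-- ===== SOURCE B (Python) =====
-- import re
--
-- _LINE_RE = re.compile(r'[^\n]*\n|[^\n]+')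
--
-- def _format_source(content: str) -> list:
--     """Convert content string to Jupyter source format (list of lines)"""
--     return _LINE_RE.findall(content)
-- ===== Notes on version B (the rewrite author's own statement) =====
-- stated objective: idiomatic
-- what changed: Replaces split('\n') plus an index-checking loop with a single precompiled regex findall(r'[^\n]*\n|[^\n]+') that tokenizes the string in one pass, keeping each newline attached and naturally dropping the empty tail.
import Mathlib
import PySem

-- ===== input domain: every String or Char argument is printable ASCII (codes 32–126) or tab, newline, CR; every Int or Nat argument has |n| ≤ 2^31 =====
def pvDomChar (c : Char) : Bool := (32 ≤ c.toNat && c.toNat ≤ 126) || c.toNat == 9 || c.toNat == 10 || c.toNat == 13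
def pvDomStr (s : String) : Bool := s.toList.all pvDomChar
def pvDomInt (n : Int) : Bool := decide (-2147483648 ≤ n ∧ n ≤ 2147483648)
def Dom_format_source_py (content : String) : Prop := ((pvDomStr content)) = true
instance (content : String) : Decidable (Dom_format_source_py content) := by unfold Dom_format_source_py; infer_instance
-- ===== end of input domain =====

-- B: one-pass regex tokenization (r'[^\n]*\n|[^\n]+') instead of split('\n') plus an indexed loop; idiomatic, same result.

-- ===== PORT A =====
-- A: lines = content.split('\n'); loop over enumerate(lines), appending line+'\n'
-- except for the last line, which is kept only if nonempty.
def format_source_py (content : String) : List String :=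
  let lines : List String := (PySem.Str.split? content "\n").getD []
  (PySem.List.enumerate lines).foldl
    (fun result (p : Int × String) =>
      if p.1 < (lines.length : Int) - 1 then result ++ [p.2 ++ "\n"]
      else if p.2 ≠ "" then result ++ [p.2]
      else result) []

-- ===== PORT B =====
-- Source B tokenizes with re.findall(r'[^\n]*\n|[^\n]+', content): each match is a maximal
-- run of non-'\n' chars followed by '\n', or a final nonempty run with no '\n'.
-- Lean has no regex; this scan is the exact hand port of that tokenization: it walks the
-- characters once, emitting the pending token at each '\n' (with the '\n' attached) and
-- the final pending token only if nonempty.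
def pvScanB : List Char → List Char → List String
  | [], acc => if acc = [] then [] else [String.ofList acc.reverse]
  | c :: rest, acc =>
      if c = '\n' then String.ofList (acc.reverse ++ ['\n']) :: pvScanB rest []
      else pvScanB rest (c :: acc)

def format_source_py_alt (content : String) : List String :=
  pvScanB content.toList []

-- ===== PRECONDITION & SPEC =====
def Spec_format_source_py (content : String) (out : List String) : Prop := out = format_source_py_alt content
instance (content : String) (out : List String) : Decidable (Spec_format_source_py content out) := by unfold Spec_format_source_py; infer_instance

-- ===== CLAIM (what is proved, stated in full; the proofs are below) =====
def Claim_equal_format_source_py : Prop := ∀ (content : String), Dom_format_source_py content → Spec_format_source_py content (format_source_py content)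

-- ===== LEMMAS AND PROOFS =====

-- the list of pieces content.split('\n') produces, defined structurally
def pvSplitNl : List Char → List (List Char)
  | [] => [[]]
  | c :: r =>
      if c = '\n' then [] :: pvSplitNl r
      else (c :: (pvSplitNl r).headI) :: (pvSplitNl r).tail

theorem pvSplitNl_ne_nil (cs : List Char) : pvSplitNl cs ≠ [] := by
  cases cs with
  | nil => simp [pvSplitNl]
  | cons c r => simp only [pvSplitNl]; split <;> simp

theorem pvSplitNl_headI_tail (cs : List Char) :
    (pvSplitNl cs).headI :: (pvSplitNl cs).tail = pvSplitNl cs := by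
  rcases h : pvSplitNl cs with _ | ⟨l, ls⟩
  · exact absurd h (pvSplitNl_ne_nil cs)
  · simp

-- the common shape of both outputs, on the pieces
def pvCanon (ls : List (List Char)) : List String :=
  ls.dropLast.map (fun l => String.ofList (l ++ ['\n'])) ++
    (match ls.getLast? with
      | none => []
      | some l => if l = [] then [] else [String.ofList l])

theorem pvCanon_cons_cons (x l : List Char) (ls : List (List Char)) :
    pvCanon (x :: l :: ls) = String.ofList (x ++ ['\n']) :: pvCanon (l :: ls) := by
  simp [pvCanon]

-- B's scan produces the canonical shape (acc is the reversed pending token)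
theorem pvScanB_eq (cs : List Char) : ∀ acc : List Char,
    pvScanB cs acc
      = pvCanon ((acc.reverse ++ (pvSplitNl cs).headI) :: (pvSplitNl cs).tail) := by
  induction cs with
  | nil =>
    intro acc
    simp only [pvScanB, pvSplitNl, pvCanon]
    rcases h : acc with _ | ⟨a, as⟩ <;> simp
  | cons c r ih =>
    intro acc
    rcases h : pvSplitNl r with _ | ⟨l, ls⟩
    · exact absurd h (pvSplitNl_ne_nil r)
    · by_cases hc : c = '\n'
      · subst hc
        simp only [pvScanB, if_pos rfl]
        rw [ih []]
        simp only [pvSplitNl, if_pos rfl, h]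
        simp [pvCanon_cons_cons]
      · simp only [pvScanB, if_neg hc]
        rw [ih (c :: acc)]
        simp only [pvSplitNl, if_neg hc, h]
        simp

-- characterization of PySem's fueled split loop for the single-char separator '\n'
theorem pvGo_eq : ∀ (fuel : Nat) (l cur : List Char) (acc : List (List Char)),
    l.length ≤ fuel →
    PySem.Chars.splitOn.go ['\n'] fuel l cur acc
      = acc.reverse ++ (cur.reverse ++ (pvSplitNl l).headI) :: (pvSplitNl l).tail := by
  intro fuel
  induction fuel with
  | zero =>
    intro l cur acc h
    have hl : l = [] := by
      cases l with
      | nil => rfl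
      | cons a b => simp at h
    subst hl
    simp [PySem.Chars.splitOn.go, pvSplitNl]
  | succ fuel ih =>
    intro l cur acc h
    cases l with
    | nil => simp [PySem.Chars.splitOn.go, pvSplitNl]
    | cons c rest =>
      rw [PySem.Chars.splitOn.go]
      have hpref : (['\n'].isPrefixOf (c :: rest)) = ('\n' == c) := by
        simp [List.isPrefixOf]
      have hr : rest.length ≤ fuel := by
        simpa using Nat.lt_succ_iff.mp (by simpa using h)
      by_cases hc : c = '\n'
      · subst hc
        simp only [hpref, beq_self_eq_true, if_true]
        rw [show List.drop ['\n'].length ('\n' :: rest) = rest by simp]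
        rw [ih rest [] (cur.reverse :: acc) hr]
        simp only [pvSplitNl]
        rw [← pvSplitNl_headI_tail rest]
        simp
      · have hb : ('\n' == c) = false := beq_eq_false_iff_ne.mpr (fun e => hc e.symm)
        simp only [hpref, hb, if_neg Bool.false_ne_true]
        rw [ih rest (c :: cur) acc hr]
        simp only [pvSplitNl, if_neg hc]
        simp

theorem pvSplitOn_nl (cs : List Char) :
    PySem.Chars.splitOn cs ['\n'] = pvSplitNl cs := by
  show PySem.Chars.splitOn.go ['\n'] (cs.length + 1) cs [] [] = _
  rw [pvGo_eq (cs.length + 1) cs [] [] (by omega)]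
  simpa using pvSplitNl_headI_tail cs

-- the canonical shape over strings, for A's loop
def pvCanonS (xs : List String) : List String :=
  xs.dropLast.map (fun l => l ++ "\n") ++
    (match xs.getLast? with
      | none => []
      | some l => if l = "" then [] else [l])

theorem pvFoldA (n : Int) : ∀ (xs : List String) (s : Int) (r0 : List String),
    s + (xs.length : Int) = n →
    (PySem.List.enumerate xs s).foldl
      (fun result p =>
        if p.1 < n - 1 then result ++ [p.2 ++ "\n"]
        else if p.2 ≠ "" then result ++ [p.2]
        else result) r0 = r0 ++ pvCanonS xs := by
  intro xs
  induction xs with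
  | nil => intro s r0 h; simp [PySem.List.enumerate_nil, pvCanonS]
  | cons x rest ih =>
    intro s r0 h
    rw [PySem.List.enumerate_cons, List.foldl_cons]
    cases rest with
    | nil =>
      have hcond : ¬ (s < n - 1) := by simp at h; omega
      simp only [PySem.List.enumerate_nil, List.foldl_nil, hcond, if_false]
      by_cases hx : x = ""
      · simp [hx, pvCanonS]
      · simp [hx, pvCanonS]
    | cons y t =>
      have hcond : s < n - 1 := by
        simp only [List.length_cons] at h; push_cast at h; omega
      simp only [hcond, if_true]
      rw [ih (s + 1) (r0 ++ [x ++ "\n"]) (by simp at h ⊢; omega)]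
      have : pvCanonS (x :: y :: t) = (x ++ "\n") :: pvCanonS (y :: t) := by
        simp [pvCanonS]
      rw [this, List.append_assoc]
      rfl

theorem pvCanonS_map (ls : List (List Char)) :
    pvCanonS (ls.map String.ofList) = pvCanon ls := by
  unfold pvCanonS pvCanon
  congr 1
  · rw [← List.map_dropLast, List.map_map]
    apply List.map_congr_left
    intro l _
    show String.ofList l ++ "\n" = String.ofList (l ++ ['\n'])
    have : ("\n" : String) = String.ofList ['\n'] := rfl
    rw [this, String.ofList_append]
  · rw [List.getLast?_map]
    rcases ls.getLast? with _ | l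
    · rfl
    · simp only [Option.map_some]
      by_cases hl : l = []
      · simp [hl]
      · have : String.ofList l ≠ "" := by
          simpa using hl
        simp [hl, this]

theorem pvLines_eq (content : String) :
    (PySem.Str.split? content "\n").getD []
      = (pvSplitNl content.toList).map String.ofList := by
  show ((PySem.Chars.split? content.toList ("\n" : String).toList).map
        (List.map String.ofList)).getD [] = _
  have : ("\n" : String).toList = ['\n'] := rfl
  rw [this]
  unfold PySem.Chars.split?
  simp [pvSplitOn_nl]

-- ===== VERDICT (by name: the statement is the Claim_ definition above) =====
theorem format_source_py_spec : Claim_equal_format_source_py := by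
  intro content _
  unfold Spec_format_source_py format_source_py format_source_py_alt
  rw [pvLines_eq content]
  rw [pvFoldA (((pvSplitNl content.toList).map String.ofList).length : Int) _ 0 [] (by simp)]
  rw [List.nil_append, pvCanonS_map]
  rw [pvScanB_eq content.toList []]
  simp [pvSplitNl_headI_tail]
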